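-- pv_equiv track=rewrite | github.com/zonArt/openlp | openlp/plugins/songs/songxml.py | _reorderVerse
-- ===== SOURCE A (Python) =====
-- def _reorderVerse(tag, tmpVerse):
--     """Reorder the verse in case of first char is a number
--
--     tag -- the tag of this verse / verse group
--     tmpVerse -- list of strings
--     """
--     res = []
--     for c in '1234567890 ':
--         tagPending = True
--         for l in tmpVerse :
--             if l.startswith(c) :
--                 if tagPending :
--                     tagPending = False
--                     t = tag.strip("[]").lower()
--                     if 'v' == t :
--                         newtag = "Verse"
--                     elif 'c' == t :
--                         newtag = "Chorus"
--                     else :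
--                         #TODO: what is the tags for bridge, pre-chorus?
--                         newtag = t
--                     s = ("# %s %s"%(newtag, c)).rstrip()
--                     res.append(s)
--                 res.append(l[1:])
--             if (len(l) == 0) and (not tagPending) :
--                 res.append(l)
--     return res
-- ===== SOURCE B (Python) =====
-- def _reorderVerse(tag, tmpVerse):
--     """Single pass: bucket lines by leading digit/space, then emit buckets in order."""
--     order = '1234567890 '
--     buckets = {}
--     for l in tmpVerse:
--         if len(l) == 0:
--             buckets = {c: v + [l] for c, v in buckets.items()}
--         elif l[0] in order:
--             buckets[l[0]] = buckets.get(l[0], []) + [l[1:]]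
--     t = tag.strip("[]").lower()
--     if 'v' == t:
--         newtag = "Verse"
--     elif 'c' == t:
--         newtag = "Chorus"
--     else:
--         newtag = t
--     res = []
--     for c in order:
--         if c in buckets:
--             res.append(("# %s %s" % (newtag, c)).rstrip())
--             res.extend(buckets[c])
--     return res
-- ===== Notes on version B (the rewrite author's own statement) =====
-- stated objective: faster
-- what changed: A scans tmpVerse once per leading character (11 passes, recomputing the tag header logic inside the scan); B does a single bucketing pass over tmpVerse into a dict keyed by leading char (appending '' to every already-seen bucket on empty lines), computes the header tag once, and then emits the buckets in the fixed '1234567890 ' order.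
import Mathlib
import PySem

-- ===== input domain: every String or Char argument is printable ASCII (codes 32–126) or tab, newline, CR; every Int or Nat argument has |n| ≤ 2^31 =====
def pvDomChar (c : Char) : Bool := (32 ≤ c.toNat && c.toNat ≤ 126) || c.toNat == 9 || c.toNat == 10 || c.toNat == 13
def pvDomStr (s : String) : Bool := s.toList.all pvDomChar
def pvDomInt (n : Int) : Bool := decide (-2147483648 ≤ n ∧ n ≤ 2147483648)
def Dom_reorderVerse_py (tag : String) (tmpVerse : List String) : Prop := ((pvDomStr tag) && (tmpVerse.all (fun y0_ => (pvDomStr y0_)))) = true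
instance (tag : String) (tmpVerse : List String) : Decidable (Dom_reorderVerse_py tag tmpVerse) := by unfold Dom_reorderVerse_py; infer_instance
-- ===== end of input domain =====

-- B replaces A's 11 passes over tmpVerse (one per leading char) by a single bucketing pass
-- plus an emit loop over the 11 chars; return values are proved equal on all inputs.

-- ===== PORT A =====
-- header string ("# %s %s" % (newtag, c)).rstrip() with t = tag.strip("[]").lower(), as computed inside A's inner loop
def headerA (tag : String) (c : Char) : String :=
  let t := PySem.Chars.lower (PySem.Chars.stripChars tag.toList ['[', ']'])
  let newtag := if t = ['v'] then "Verse".toList else if t = ['c'] then "Chorus".toList else t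
  String.mk (PySem.Chars.rstrip (['#', ' '] ++ newtag ++ [' ', c]))

-- one iteration of A's inner 'for l in tmpVerse' loop; state = (res, tagPending)
def stepA (tag : String) (c : Char) (st : List String × Bool) (l : String) : List String × Bool :=
  let st1 : List String × Bool :=
    if PySem.Chars.startswith l.toList [c] then
      ((if st.2 then st.1 ++ [headerA tag c] else st.1)
         ++ [String.mk (PySem.List.slice l.toList (some 1) none)], false)
    else st
  if (l.toList.length == 0) && (!st1.2) then (st1.1 ++ [l], st1.2) else st1

def reorderVerse_py (tag : String) (tmpVerse : List String) : List String :=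
  ("1234567890 ".toList).foldl (fun res c => (tmpVerse.foldl (stepA tag c) (res, true)).1) []

-- ===== PORT B =====
-- one iteration of B's bucketing pass over tmpVerse
def stepB (d : PySem.Dict Char (List String)) (l : String) : PySem.Dict Char (List String) :=
  match l.toList with
  | [] => PySem.Dict.mk (d.items.map (fun p => (p.1, p.2 ++ [l])))  -- {c: v + [l] for c, v in buckets.items()}
  | a :: _ =>
    if ("1234567890 ".toList).contains a then
      d.modify a [] (· ++ [String.mk (PySem.List.slice l.toList (some 1) none)])
    else d

def reorderVerse_py_alt (tag : String) (tmpVerse : List String) : List String :=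
  let buckets := tmpVerse.foldl stepB PySem.Dict.empty
  let t := PySem.Chars.lower (PySem.Chars.stripChars tag.toList ['[', ']'])
  let newtag := if t = ['v'] then "Verse".toList else if t = ['c'] then "Chorus".toList else t
  ("1234567890 ".toList).foldl (fun res c =>
    if buckets.contains c then
      res ++ [String.mk (PySem.Chars.rstrip (['#', ' '] ++ newtag ++ [' ', c]))] ++ buckets.getD c []
    else res) []

-- ===== PRECONDITION & SPEC =====
def Spec_reorderVerse_py (tag : String) (tmpVerse : List String) (out : List String) : Prop := out = reorderVerse_py_alt tag tmpVerse
instance (tag : String) (tmpVerse : List String) (out : List String) : Decidable (Spec_reorderVerse_py tag tmpVerse out) := by unfold Spec_reorderVerse_py; infer_instance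

-- ===== CLAIM (what is proved, stated in full; the proofs are below) =====
def Claim_equal_reorderVerse_py : Prop := ∀ (tag : String) (tmpVerse : List String), Dom_reorderVerse_py tag tmpVerse → Spec_reorderVerse_py tag tmpVerse (reorderVerse_py tag tmpVerse)

-- ===== LEMMAS AND PROOFS =====

-- shared per-character trace: state = (seen a line starting with c, items collected for c)
def traceP (c : Char) (st : Bool × List String) (l : String) : Bool × List String :=
  match l.toList, st with
  | [], (true, xs) => (true, xs ++ [l])
  | [], (false, xs) => (false, xs)
  | a :: _, (m, xs) =>
    if a = c then (true, xs ++ [String.mk (PySem.List.slice l.toList (some 1) none)]) else (m, xs)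

-- single-step characterisations of the trace
theorem traceP_empty_t (c : Char) (l : String) (h : l.toList = []) (xs : List String) :
    traceP c (true, xs) l = (true, xs ++ [l]) := by
  simp [traceP.eq_def, h]

theorem traceP_empty_f (c : Char) (l : String) (h : l.toList = []) (xs : List String) :
    traceP c (false, xs) l = (false, xs) := by
  simp [traceP.eq_def, h]

theorem traceP_match (c : Char) (l : String) (tl : List Char) (h : l.toList = c :: tl)
    (m : Bool) (xs : List String) :
    traceP c (m, xs) l = (true, xs ++ [String.mk (PySem.List.slice l.toList (some 1) none)]) := by
  simp [traceP.eq_def, h]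

theorem traceP_other (c : Char) (l : String) (a : Char) (tl : List Char)
    (h : l.toList = a :: tl) (ha : a ≠ c) (m : Bool) (xs : List String) :
    traceP c (m, xs) l = (m, xs) := by
  simp [traceP.eq_def, h, ha]

-- accumulator shift
theorem traceP_shift (c : Char) (ls : List String) : ∀ (m : Bool) (xs : List String),
    ls.foldl (traceP c) (m, xs) =
      ((ls.foldl (traceP c) (m, [])).1, xs ++ (ls.foldl (traceP c) (m, [])).2) := by
  induction ls with
  | nil => intro m xs; simp
  | cons l rest ih =>
    intro m xs
    simp only [List.foldl_cons]
    rcases h : l.toList with _ | ⟨a, tl⟩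
    · rcases m with _ | _
      · rw [traceP_empty_f c l h, traceP_empty_f c l h]
        exact ih false xs
      · rw [traceP_empty_t c l h, traceP_empty_t c l h]
        rw [ih true (xs ++ [l]), ih true ([] ++ [l])]
        simp
    · by_cases ha : a = c
      · have h' : l.toList = c :: tl := ha ▸ h
        rw [traceP_match c l tl h', traceP_match c l tl h']
        rw [ih true (xs ++ _), ih true ([] ++ _)]
        simp
      · rw [traceP_other c l a tl h ha, traceP_other c l a tl h ha]
        exact ih m xs

theorem traceP_true (c : Char) (ls : List String) : ∀ (xs : List String),
    (ls.foldl (traceP c) (true, xs)).1 = true := by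
  induction ls with
  | nil => intro xs; simp
  | cons l rest ih =>
    intro xs
    simp only [List.foldl_cons]
    rcases h : l.toList with _ | ⟨a, tl⟩
    · rw [traceP_empty_t c l h]; exact ih _
    · by_cases ha : a = c
      · have h' : l.toList = c :: tl := ha ▸ h
        rw [traceP_match c l tl h']; exact ih _
      · rw [traceP_other c l a tl h ha]; exact ih _

-- single-step characterisations of A's inner loop body, at the two states it visits
theorem stepA_empty_pending (tag : String) (c : Char) (res : List String) (l : String)
    (h : l.toList = []) : stepA tag c (res, true) l = (res, true) := by
  have hsw : PySem.Chars.startswith ([] : List Char) [c] = false := by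
    simp [PySem.Chars.startswith, List.isPrefixOf]
  simp [stepA, h, hsw]

theorem stepA_empty_done (tag : String) (c : Char) (res : List String) (l : String)
    (h : l.toList = []) : stepA tag c (res, false) l = (res ++ [l], false) := by
  have hsw : PySem.Chars.startswith ([] : List Char) [c] = false := by
    simp [PySem.Chars.startswith, List.isPrefixOf]
  simp [stepA, h, hsw]

theorem stepA_match_pending (tag : String) (c : Char) (res : List String) (l : String)
    (tl : List Char) (h : l.toList = c :: tl) :
    stepA tag c (res, true) l
      = (res ++ [headerA tag c] ++ [String.mk (PySem.List.slice l.toList (some 1) none)], false) := by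
  have hsw : PySem.Chars.startswith (c :: tl) [c] = true := by
    simp [PySem.Chars.startswith, List.isPrefixOf]
  simp [stepA, h, hsw]

theorem stepA_match_done (tag : String) (c : Char) (res : List String) (l : String)
    (tl : List Char) (h : l.toList = c :: tl) :
    stepA tag c (res, false) l
      = (res ++ [String.mk (PySem.List.slice l.toList (some 1) none)], false) := by
  have hsw : PySem.Chars.startswith (c :: tl) [c] = true := by
    simp [PySem.Chars.startswith, List.isPrefixOf]
  simp [stepA, h, hsw]

theorem stepA_other (tag : String) (c : Char) (st : List String × Bool) (l : String)
    (a : Char) (tl : List Char) (h : l.toList = a :: tl) (ha : a ≠ c) :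
    stepA tag c st l = st := by
  have hsw : PySem.Chars.startswith (a :: tl) [c] = false := by
    simp [PySem.Chars.startswith, List.isPrefixOf]
    exact fun hca => absurd hca.symm ha
  rcases st with ⟨r, _ | _⟩ <;> simp [stepA, h, hsw]

-- A's inner loop with tagPending already false
theorem stepA_false (tag : String) (c : Char) (ls : List String) : ∀ (res : List String),
    ls.foldl (stepA tag c) (res, false) = (res ++ (ls.foldl (traceP c) (true, [])).2, false) := by
  induction ls with
  | nil => intro res; simp
  | cons l rest ih =>
    intro res
    simp only [List.foldl_cons]
    rcases h : l.toList with _ | ⟨a, tl⟩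
    · rw [stepA_empty_done tag c res l h, ih (res ++ [l]), traceP_empty_t c l h,
        traceP_shift c rest true ([] ++ [l])]
      simp
    · by_cases ha : a = c
      · have h' : l.toList = c :: tl := ha ▸ h
        rw [stepA_match_done tag c res l tl h', ih, traceP_match c l tl h',
          traceP_shift c rest true ([] ++ _)]
        simp
      · rw [stepA_other tag c _ l a tl h ha, ih, traceP_other c l a tl h ha]

-- A's inner loop from its initial state (tagPending = True)
theorem stepA_true (tag : String) (c : Char) (ls : List String) : ∀ (res : List String),
    ls.foldl (stepA tag c) (res, true) =
      (res ++ (if (ls.foldl (traceP c) (false, [])).1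
               then headerA tag c :: (ls.foldl (traceP c) (false, [])).2
               else []),
       !(ls.foldl (traceP c) (false, [])).1) := by
  induction ls with
  | nil => intro res; simp
  | cons l rest ih =>
    intro res
    simp only [List.foldl_cons]
    rcases h : l.toList with _ | ⟨a, tl⟩
    · rw [stepA_empty_pending tag c res l h, ih, traceP_empty_f c l h]
    · by_cases ha : a = c
      · have h' : l.toList = c :: tl := ha ▸ h
        rw [stepA_match_pending tag c res l tl h', stepA_false, traceP_match c l tl h',
          traceP_shift c rest true ([] ++ _), traceP_true]
        simp
      · rw [stepA_other tag c _ l a tl h ha, ih, traceP_other c l a tl h ha]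

-- value-map over a dict's items, seen through get?
theorem get?_mk_map_values (f : List String → List String) (c : Char) :
    ∀ (its : List (Char × List String)),
      (PySem.Dict.mk (its.map (fun p => (p.1, f p.2)))).get? c
        = ((PySem.Dict.mk its).get? c).map f := by
  intro its
  induction its with
  | nil => simp [PySem.Dict.get?]
  | cons p rest ih =>
    rcases p with ⟨k, v⟩
    simp only [List.map_cons]
    rw [PySem.Dict.get?_mk_cons, PySem.Dict.get?_mk_cons]
    by_cases hp : (k == c) = true
    · rw [if_pos hp, if_pos hp]; rfl
    · rw [if_neg hp, if_neg hp]; exact ih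

-- single-step characterisations of B's bucketing pass body
theorem stepB_empty (d : PySem.Dict Char (List String)) (l : String) (h : l.toList = []) :
    stepB d l = PySem.Dict.mk (d.items.map (fun p => (p.1, p.2 ++ [l]))) := by
  simp only [stepB, h]

theorem stepB_cons (d : PySem.Dict Char (List String)) (l : String) (a : Char) (tl : List Char)
    (h : l.toList = a :: tl) :
    stepB d l = if ("1234567890 ".toList).contains a then
        d.modify a [] (· ++ [String.mk (PySem.List.slice l.toList (some 1) none)])
      else d := by
  simp only [stepB, h]

-- B's bucketing pass, observed at one character c of the order string
theorem stepB_trace (c : Char) (hc : ("1234567890 ".toList).contains c = true) (ls : List String) :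
    ∀ (d : PySem.Dict Char (List String)),
      ((ls.foldl stepB d).contains c, (ls.foldl stepB d).getD c [])
        = ls.foldl (traceP c) (d.contains c, d.getD c []) := by
  induction ls with
  | nil => intro d; simp
  | cons l rest ih =>
    intro d
    simp only [List.foldl_cons]
    rw [ih (stepB d l)]
    congr 1
    rcases h : l.toList with _ | ⟨a, tl⟩
    · rw [stepB_empty d l h]
      rcases hg : d.get? c with _ | xs
      · have hm : d.contains c = false := by
          rw [PySem.Dict.contains_eq_isSome_get?, hg]; rfl
        have hmap : (PySem.Dict.mk (d.items.map (fun p => (p.1, p.2 ++ [l])))).get? c = none := by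
          rw [get?_mk_map_values (· ++ [l]) c d.items]
          have hd : (PySem.Dict.mk d.items) = d := rfl
          rw [hd, hg]; rfl
        rw [PySem.Dict.contains_eq_isSome_get?, hmap,
          PySem.Dict.getD_eq_get?_getD, hmap, hm,
          PySem.Dict.getD_eq_get?_getD, hg, traceP_empty_f c l h]
        rfl
      · have hm : d.contains c = true := by
          rw [PySem.Dict.contains_eq_isSome_get?, hg]; rfl
        have hmap : (PySem.Dict.mk (d.items.map (fun p => (p.1, p.2 ++ [l])))).get? c
            = some (xs ++ [l]) := by
          rw [get?_mk_map_values (· ++ [l]) c d.items]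
          have hd : (PySem.Dict.mk d.items) = d := rfl
          rw [hd, hg]; rfl
        rw [PySem.Dict.contains_eq_isSome_get?, hmap,
          PySem.Dict.getD_eq_get?_getD, hmap, hm,
          PySem.Dict.getD_eq_get?_getD, hg, traceP_empty_t c l h]
        rfl
    · by_cases ha : a = c
      · have h' : l.toList = c :: tl := ha ▸ h
        rw [stepB_cons d l a tl h, ha, if_pos hc,
          PySem.Dict.contains_modify, PySem.Dict.getD_modify_self,
          traceP_match c l tl h']
        simp
      · rw [stepB_cons d l a tl h, traceP_other c l a tl h ha]
        by_cases hin : ("1234567890 ".toList).contains a = true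
        · rw [if_pos hin, PySem.Dict.contains_modify, PySem.Dict.getD_modify]
          simp [Ne.symm ha]
        · rw [if_neg hin]

-- ===== VERDICT (by name: the statement is the Claim_ definition above) =====
theorem reorderVerse_py_spec : Claim_equal_reorderVerse_py := by
  intro tag tmpVerse _
  simp only [Spec_reorderVerse_py, reorderVerse_py, reorderVerse_py_alt]
  rw [PySem.List.foldl_congr_mem' ("1234567890 ".toList)
      (fun res c => (tmpVerse.foldl (stepA tag c) (res, true)).1)
      (fun res c => res ++ (if (tmpVerse.foldl (traceP c) (false, [])).1
          then headerA tag c :: (tmpVerse.foldl (traceP c) (false, [])).2 else []))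
      [] (by intro c _ res; simp only [stepA_true])]
  refine Eq.symm (PySem.List.foldl_congr_mem' ("1234567890 ".toList) _ _ [] ?_)
  intro c hc res
  have hcc : ("1234567890 ".toList).contains c = true := by
    simpa using hc
  have hb := stepB_trace c hcc tmpVerse PySem.Dict.empty
  simp only [PySem.Dict.contains_empty, PySem.Dict.getD_empty] at hb
  have h1 : (tmpVerse.foldl stepB PySem.Dict.empty).contains c
      = (tmpVerse.foldl (traceP c) (false, [])).1 := by
    have := congrArg Prod.fst hb; simpa using this
  have h2 : (tmpVerse.foldl stepB PySem.Dict.empty).getD c []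
      = (tmpVerse.foldl (traceP c) (false, [])).2 := by
    have := congrArg Prod.snd hb; simpa using this
  simp only [h1, h2]
  rcases hm : (tmpVerse.foldl (traceP c) (false, [])).1 with _ | _
  · simp
  · simp [headerA]
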